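-- pv_equiv track=rewrite | github.com/imthebreezy247/Hitting-Inboxes | src/utils/validators.py | _check_domain_typos
-- ===== SOURCE A (Python) =====
-- from typing import Dict, List, Tuple, Optional
--
-- def _check_domain_typos(domain: str) -> Optional[str]:
--     """Check for common typos in popular email domains"""
--     popular_domains = {
--         'gmail.com': ['gmai.com', 'gmial.com', 'gmail.co', 'gmaill.com'],
--         'yahoo.com': ['yaho.com', 'yahoo.co', 'yahooo.com'],
--         'outlook.com': ['outlook.co', 'outlok.com', 'outloo.com'],
--         'hotmail.com': ['hotmai.com', 'hotmail.co', 'hotmial.com']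
--     }
--
--     for correct_domain, typos in popular_domains.items():
--         if domain in typos:
--             return correct_domain
--
--     return None
-- ===== SOURCE B (Python) =====
-- _TYPO_TO_CORRECT = {
--     'gmai.com': 'gmail.com', 'gmial.com': 'gmail.com',
--     'gmail.co': 'gmail.com', 'gmaill.com': 'gmail.com',
--     'yaho.com': 'yahoo.com', 'yahoo.co': 'yahoo.com', 'yahooo.com': 'yahoo.com',
--     'outlook.co': 'outlook.com', 'outlok.com': 'outlook.com', 'outloo.com': 'outlook.com',
--     'hotmai.com': 'hotmail.com', 'hotmail.co': 'hotmail.com', 'hotmial.com': 'hotmail.com',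
-- }
--
-- def _check_domain_typos(domain: str):
--     """Check for common typos in popular email domains"""
--     return _TYPO_TO_CORRECT.get(domain)
-- ===== Notes on version B (the rewrite author's own statement) =====
-- stated objective: simpler
-- what changed: Replaced the scan over (correct, typo-list) pairs with list membership tests by a single flat typo->correct dict built once at module level, so the body is one .get lookup with no loop.
import Mathlib
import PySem

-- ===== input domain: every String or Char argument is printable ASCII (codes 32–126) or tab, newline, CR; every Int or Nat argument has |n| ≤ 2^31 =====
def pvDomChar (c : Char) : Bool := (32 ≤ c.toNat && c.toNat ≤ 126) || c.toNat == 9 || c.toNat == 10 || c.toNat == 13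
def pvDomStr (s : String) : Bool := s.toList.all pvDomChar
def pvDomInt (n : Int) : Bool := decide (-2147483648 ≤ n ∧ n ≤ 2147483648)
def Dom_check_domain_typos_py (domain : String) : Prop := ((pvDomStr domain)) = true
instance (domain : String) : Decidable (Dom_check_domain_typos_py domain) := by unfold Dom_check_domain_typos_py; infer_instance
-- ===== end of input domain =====

-- B replaces A's scan over (correct, typos) pairs by one flat typo->correct dict lookup (simpler).

-- ===== PORT A =====
-- the dict literal of A, in insertion order
def pvPopularDomainsA : List (String × List String) :=
  [("gmail.com", ["gmai.com", "gmial.com", "gmail.co", "gmaill.com"]),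
   ("yahoo.com", ["yaho.com", "yahoo.co", "yahooo.com"]),
   ("outlook.com", ["outlook.co", "outlok.com", "outloo.com"]),
   ("hotmail.com", ["hotmai.com", "hotmail.co", "hotmial.com"])]

-- the 'for … if domain in typos: return correct_domain' loop with early return
def pvLoopA (domain : String) : List (String × List String) → Option String
  | [] => none
  | (correct, typos) :: rest =>
      if domain ∈ typos then some correct else pvLoopA domain rest

def check_domain_typos_py (domain : String) : Option String :=
  pvLoopA domain pvPopularDomainsA

-- ===== PORT B =====
-- the flat typo -> correct dict of Source B
def pvTypoToCorrect : PySem.Dict String String :=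
  PySem.Dict.mk
    [("gmai.com", "gmail.com"), ("gmial.com", "gmail.com"),
     ("gmail.co", "gmail.com"), ("gmaill.com", "gmail.com"),
     ("yaho.com", "yahoo.com"), ("yahoo.co", "yahoo.com"), ("yahooo.com", "yahoo.com"),
     ("outlook.co", "outlook.com"), ("outlok.com", "outlook.com"), ("outloo.com", "outlook.com"),
     ("hotmai.com", "hotmail.com"), ("hotmail.co", "hotmail.com"), ("hotmial.com", "hotmail.com")]

def check_domain_typos_py_alt (domain : String) : Option String :=
  pvTypoToCorrect.get? domain

-- ===== PRECONDITION & SPEC =====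
def Spec_check_domain_typos_py (domain : String) (out : Option String) : Prop := out = check_domain_typos_py_alt domain
instance (domain : String) (out : Option String) : Decidable (Spec_check_domain_typos_py domain out) := by unfold Spec_check_domain_typos_py; infer_instance

-- ===== CLAIM (what is proved, stated in full; the proofs are below) =====
def Claim_equal_check_domain_typos_py : Prop := ∀ (domain : String), Dom_check_domain_typos_py domain → Spec_check_domain_typos_py domain (check_domain_typos_py domain)

-- ===== LEMMAS AND PROOFS =====

-- ===== VERDICT (by name: the statement is the Claim_ definition above) =====
theorem check_domain_typos_py_spec : Claim_equal_check_domain_typos_py := by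
  intro domain _
  unfold Spec_check_domain_typos_py check_domain_typos_py check_domain_typos_py_alt
  by_cases h0 : domain = "gmai.com"
  · subst h0; decide
  by_cases h1 : domain = "gmial.com"
  · subst h1; decide
  by_cases h2 : domain = "gmail.co"
  · subst h2; decide
  by_cases h3 : domain = "gmaill.com"
  · subst h3; decide
  by_cases h4 : domain = "yaho.com"
  · subst h4; decide
  by_cases h5 : domain = "yahoo.co"
  · subst h5; decide
  by_cases h6 : domain = "yahooo.com"
  · subst h6; decide
  by_cases h7 : domain = "outlook.co"
  · subst h7; decide
  by_cases h8 : domain = "outlok.com"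
  · subst h8; decide
  by_cases h9 : domain = "outloo.com"
  · subst h9; decide
  by_cases h10 : domain = "hotmai.com"
  · subst h10; decide
  by_cases h11 : domain = "hotmail.co"
  · subst h11; decide
  by_cases h12 : domain = "hotmial.com"
  · subst h12; decide
  have b0 : ("gmai.com" == domain) = false := beq_eq_false_iff_ne.mpr (fun h => h0 h.symm)
  have b1 : ("gmial.com" == domain) = false := beq_eq_false_iff_ne.mpr (fun h => h1 h.symm)
  have b2 : ("gmail.co" == domain) = false := beq_eq_false_iff_ne.mpr (fun h => h2 h.symm)
  have b3 : ("gmaill.com" == domain) = false := beq_eq_false_iff_ne.mpr (fun h => h3 h.symm)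
  have b4 : ("yaho.com" == domain) = false := beq_eq_false_iff_ne.mpr (fun h => h4 h.symm)
  have b5 : ("yahoo.co" == domain) = false := beq_eq_false_iff_ne.mpr (fun h => h5 h.symm)
  have b6 : ("yahooo.com" == domain) = false := beq_eq_false_iff_ne.mpr (fun h => h6 h.symm)
  have b7 : ("outlook.co" == domain) = false := beq_eq_false_iff_ne.mpr (fun h => h7 h.symm)
  have b8 : ("outlok.com" == domain) = false := beq_eq_false_iff_ne.mpr (fun h => h8 h.symm)
  have b9 : ("outloo.com" == domain) = false := beq_eq_false_iff_ne.mpr (fun h => h9 h.symm)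
  have b10 : ("hotmai.com" == domain) = false := beq_eq_false_iff_ne.mpr (fun h => h10 h.symm)
  have b11 : ("hotmail.co" == domain) = false := beq_eq_false_iff_ne.mpr (fun h => h11 h.symm)
  have b12 : ("hotmial.com" == domain) = false := beq_eq_false_iff_ne.mpr (fun h => h12 h.symm)
  simp [pvLoopA, pvPopularDomainsA, pvTypoToCorrect, PySem.Dict.get?_mk_cons, PySem.Dict.get?, h0,h1,h2,h3,h4,h5,h6,h7,h8,h9,h10,h11,h12, b0,b1,b2,b3,b4,b5,b6,b7,b8,b9,b10,b11,b12]
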